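-- pv_equiv track=rewrite | github.com/frankiert/ArtTabGen-Code | arttabgen/helper.py | find_letter_in_similar_looking_ones
-- ===== SOURCE A (Python) =====
-- from typing import (
--     Any,
--     Dict,
--     Iterable,
--     Iterator,
--     List,
--     Optional,
--     Sequence,
--     Tuple,
--     TypedDict,
--     Union,
-- )
--
-- PAIRS_OF_SIMILAR_LOOKING_LETTERS: List[List[str]] = [
--     ["e", "c"],
--     ["u", "v"],
--     ["m", "n"],
--     ["p", "q"],
--     ["b", "d"],
--     ["B", "D"],
--     ["Q", "O"],
--     ["l", "I"]
-- ]
--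
-- def find_letter_in_similar_looking_ones(letter: str) -> Optional[Tuple[int, int]]:
--     """Find the position of a letter in the list of similar looking letters defined in PAIRS_OF_SIMILAR_LOOKING_LETTERS.
--
--     Args:
--         letter: A letter to find the position of.
--
--     Returns:
--         A tuple containing the row and column defining the letters position in the list of similar looking letters,
--         on success.
--         None, if the letter is not contained in the list of similar looking letters.
--     """
--
--     for i, row in enumerate(PAIRS_OF_SIMILAR_LOOKING_LETTERS):
--         try:
--             j: int = row.index(letter)  # noqa: VNE001
--         except ValueError:
--             continue
--
--         return i, j
--
--     return None
-- ===== SOURCE B (Python) =====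
-- from typing import Optional, Tuple
--
-- # All similar-looking letters flattened row-major into one string; pair i occupies
-- # positions 2*i and 2*i + 1, so a letter's (row, col) is just divmod(index, 2).
-- SIMILAR_FLAT: str = "ecuvmnpqbdBDQOlI"
--
-- def find_letter_in_similar_looking_ones(letter: str) -> Optional[Tuple[int, int]]:
--     if len(letter) != 1:
--         return None
--     k = SIMILAR_FLAT.find(letter)
--     return None if k == -1 else (k // 2, k % 2)
-- ===== Notes on version B (the rewrite author's own statement) =====
-- stated objective: alternative
-- what changed: Removes the nested list-of-pairs structure entirely: B flattens the table row-major into one constant string and computes (row, col) arithmetically as divmod(find-index, 2) from a single str.find, instead of A's outer loop over rows with row.index and try/except.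
import Mathlib
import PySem

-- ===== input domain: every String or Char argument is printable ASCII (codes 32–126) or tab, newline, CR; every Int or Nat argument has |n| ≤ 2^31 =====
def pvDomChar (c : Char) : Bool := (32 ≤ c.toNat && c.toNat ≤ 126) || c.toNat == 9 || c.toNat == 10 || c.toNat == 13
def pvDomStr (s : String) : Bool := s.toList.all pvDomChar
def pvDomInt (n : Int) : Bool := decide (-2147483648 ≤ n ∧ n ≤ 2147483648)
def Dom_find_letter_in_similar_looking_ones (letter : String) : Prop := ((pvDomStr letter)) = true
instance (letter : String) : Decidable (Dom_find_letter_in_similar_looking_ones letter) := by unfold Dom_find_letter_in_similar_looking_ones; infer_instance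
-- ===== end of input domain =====

-- B drops the nested pair-list: it flattens the table into one constant string and decodes (row, col) as divmod(find-index, 2) (alternative algorithm).

-- ===== PORT A =====
def pvPairsOfSimilarLookingLetters : List (List String) :=
  [["e", "c"], ["u", "v"], ["m", "n"], ["p", "q"],
   ["b", "d"], ["B", "D"], ["Q", "O"], ["l", "I"]]

-- the 'for i, row in enumerate(...)' loop: first row containing letter wins, row.index gives the column
def pvFindLoopA (letter : String) : List (Int × List String) → Option (Int × Int)
  | [] => none
  | (i, row) :: rest =>
    match PySem.List.index? row letter with
    | none => pvFindLoopA letter rest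
    | some j => some (i, (j : Int))

def find_letter_in_similar_looking_ones (letter : String) : Option (Int × Int) :=
  pvFindLoopA letter (PySem.List.enumerate pvPairsOfSimilarLookingLetters)

-- ===== PORT B =====
-- SIMILAR_FLAT: the table flattened row-major; (row, col) = divmod(index, 2)
def pvSimilarFlat : String := "ecuvmnpqbdBDQOlI"

def find_letter_in_similar_looking_ones_alt (letter : String) : Option (Int × Int) :=
  if (PySem.Str.len letter : Int) ≠ 1 then none
  else
    let k := PySem.Str.find pvSimilarFlat letter
    if k = -1 then none else some (PySem.Int.floordiv k 2, PySem.Int.mod k 2)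

-- ===== PRECONDITION & SPEC =====
def Spec_find_letter_in_similar_looking_ones (letter : String) (out : Option (Int × Int)) : Prop := out = find_letter_in_similar_looking_ones_alt letter
instance (letter : String) (out : Option (Int × Int)) : Decidable (Spec_find_letter_in_similar_looking_ones letter out) := by unfold Spec_find_letter_in_similar_looking_ones; infer_instance

-- ===== CLAIM (what is proved, stated in full; the proofs are below) =====
def Claim_equal_find_letter_in_similar_looking_ones : Prop := ∀ (letter : String), Dom_find_letter_in_similar_looking_ones letter → Spec_find_letter_in_similar_looking_ones letter (find_letter_in_similar_looking_ones letter)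

-- ===== LEMMAS AND PROOFS =====

-- ===== VERDICT (by name: the statement is the Claim_ definition above) =====
theorem find_letter_in_similar_looking_ones_spec : Claim_equal_find_letter_in_similar_looking_ones := by
  intro letter _
  unfold Spec_find_letter_in_similar_looking_ones
  by_cases h1 : letter = "e";  · subst h1; decide
  by_cases h2 : letter = "c";  · subst h2; decide
  by_cases h3 : letter = "u";  · subst h3; decide
  by_cases h4 : letter = "v";  · subst h4; decide
  by_cases h5 : letter = "m";  · subst h5; decide
  by_cases h6 : letter = "n";  · subst h6; decide
  by_cases h7 : letter = "p";  · subst h7; decide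
  by_cases h8 : letter = "q";  · subst h8; decide
  by_cases h9 : letter = "b";  · subst h9; decide
  by_cases h10 : letter = "d"; · subst h10; decide
  by_cases h11 : letter = "B"; · subst h11; decide
  by_cases h12 : letter = "D"; · subst h12; decide
  by_cases h13 : letter = "Q"; · subst h13; decide
  by_cases h14 : letter = "O"; · subst h14; decide
  by_cases h15 : letter = "l"; · subst h15; decide
  by_cases h16 : letter = "I"; · subst h16; decide
  -- letter is none of the 16 table entries: both sides return none
  have hA : find_letter_in_similar_looking_ones letter = none := by
    simp [find_letter_in_similar_looking_ones, pvPairsOfSimilarLookingLetters,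
      PySem.List.enumerate_cons, PySem.List.enumerate_nil, pvFindLoopA,
      PySem.List.index?_eq_idxOf?, List.idxOf?, List.findIdx?_cons, List.findIdx?_nil,
      Ne.symm h1, Ne.symm h2, Ne.symm h3, Ne.symm h4, Ne.symm h5, Ne.symm h6,
      Ne.symm h7, Ne.symm h8, Ne.symm h9, Ne.symm h10, Ne.symm h11, Ne.symm h12,
      Ne.symm h13, Ne.symm h14, Ne.symm h15, Ne.symm h16]
  have hB : find_letter_in_similar_looking_ones_alt letter = none := by
    unfold find_letter_in_similar_looking_ones_alt
    match hm : letter.toList with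
    | [] =>
      have : letter.toList.length = 0 := by rw [hm]; rfl
      simp [this]
    | c :: c' :: cs =>
      have : letter.toList.length = cs.length + 2 := by rw [hm]; simp
      simp only [PySem.Str.len_eq, this]
      rw [if_pos (by push_cast; omega : ((cs.length + 2 : Nat) : Int) ≠ 1)]
    | [c] =>
      have hlen : letter.toList.length = 1 := by rw [hm]; rfl
      have key : c ∉ pvSimilarFlat.toList := by
        intro hc
        simp [pvSimilarFlat] at hc
        rcases hc with rfl|rfl|rfl|rfl|rfl|rfl|rfl|rfl|rfl|rfl|rfl|rfl|rfl|rfl|rfl|rfl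
        · exact h1 (String.toList_inj.mp (by rw [hm]; rfl))
        · exact h2 (String.toList_inj.mp (by rw [hm]; rfl))
        · exact h3 (String.toList_inj.mp (by rw [hm]; rfl))
        · exact h4 (String.toList_inj.mp (by rw [hm]; rfl))
        · exact h5 (String.toList_inj.mp (by rw [hm]; rfl))
        · exact h6 (String.toList_inj.mp (by rw [hm]; rfl))
        · exact h7 (String.toList_inj.mp (by rw [hm]; rfl))
        · exact h8 (String.toList_inj.mp (by rw [hm]; rfl))
        · exact h9 (String.toList_inj.mp (by rw [hm]; rfl))
        · exact h10 (String.toList_inj.mp (by rw [hm]; rfl))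
        · exact h11 (String.toList_inj.mp (by rw [hm]; rfl))
        · exact h12 (String.toList_inj.mp (by rw [hm]; rfl))
        · exact h13 (String.toList_inj.mp (by rw [hm]; rfl))
        · exact h14 (String.toList_inj.mp (by rw [hm]; rfl))
        · exact h15 (String.toList_inj.mp (by rw [hm]; rfl))
        · exact h16 (String.toList_inj.mp (by rw [hm]; rfl))
      have hfind : PySem.Chars.find pvSimilarFlat.toList letter.toList = -1 := by
        rw [PySem.Chars.find_eq_neg_one_iff, hm, List.singleton_infix_iff]
        exact key
      simp [hlen, hfind]
  rw [hA, hB]
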